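-- pv_equiv track=rewrite | github.com/cmplx-xyttmt/competitive-programming | python/src/advent_of_code/2025/day2/day2.py | repeat_twice
-- ===== SOURCE A (Python) =====
-- def repeat_twice(left, right):
--     mul = 10
--     lower = 1
--     upper = 9
--     repeats = []
--     while (lower * mul + lower) <= right:
--         # smallest = (lower * mul + lower)
--         # largest = (upper * mul + upper)
--         for num in range(lower, upper + 1):
--             repeat_number = num * mul + num
--             if left <= repeat_number <= right:
--                 repeats.append(repeat_number)
--         mul *= 10
--         lower = mul // 10
--         upper = mul - 1
--     return repeats
-- ===== SOURCE B (Python) =====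
-- def repeat_twice(left, right):
--     # The candidates num*(10^len(num)+1) are strictly increasing in num, so
--     # instead of enumerating per digit-length block, binary-search the monotone
--     # value function for the first and last qualifying num and emit that range.
--     def f(n):
--         p = 10
--         while p <= n:
--             p *= 10
--         return n * (p + 1)
--
--     if right < 11:
--         return []
--     lo, hi = 1, right + 1          # f(lo) <= right < f(hi)
--     while hi - lo > 1:
--         mid = (lo + hi) // 2
--         if f(mid) <= right:
--             lo = mid
--         else:
--             hi = mid
--     n_hi = lo
--     if left <= f(1):
--         n_lo = 1
--     elif f(n_hi) < left:
--         return []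
--     else:
--         lo, hi = 1, n_hi           # f(lo) < left <= f(hi)
--         while hi - lo > 1:
--             mid = (lo + hi) // 2
--             if f(mid) >= left:
--                 hi = mid
--             else:
--                 lo = mid
--         n_lo = hi
--     return [f(n) for n in range(n_lo, n_hi + 1)]
-- ===== Notes on version B (the rewrite author's own statement) =====
-- stated objective: faster
-- what changed: A enumerates every candidate of each digit-length block and filter-tests it; B binary-searches the strictly increasing value function f(n) = n*(10^len(n)+1) for the first and last qualifying n and emits that one contiguous range.
import Mathlib
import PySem

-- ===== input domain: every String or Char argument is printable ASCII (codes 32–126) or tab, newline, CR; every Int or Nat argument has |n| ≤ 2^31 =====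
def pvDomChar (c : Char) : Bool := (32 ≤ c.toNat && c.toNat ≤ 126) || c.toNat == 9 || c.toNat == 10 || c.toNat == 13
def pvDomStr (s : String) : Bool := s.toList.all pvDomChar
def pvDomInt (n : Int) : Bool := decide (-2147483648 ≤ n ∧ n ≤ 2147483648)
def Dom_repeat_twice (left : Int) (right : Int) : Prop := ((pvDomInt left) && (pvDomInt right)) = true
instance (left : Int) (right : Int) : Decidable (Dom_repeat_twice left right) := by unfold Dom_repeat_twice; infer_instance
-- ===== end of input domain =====

-- B replaces A's per-digit-length block enumeration by binary search on the strictly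
-- monotone value function f(n) = n*(10^len(n)+1), then emits one contiguous range.
-- All fuel arguments (64) are totality guards only: on the stated domain (|args| ≤ 2^31)
-- every while loop exits long before the fuel runs out.

-- ===== PORT A =====
def repeatTwiceLoopA (left right : Int) : Nat → Int → Int → Int → List Int → List Int
  | 0, _, _, _, repeats => repeats
  | fuel+1, mul, lower, upper, repeats =>
    if lower * mul + lower ≤ right then
      let repeats' := (PySem.List.pyRange lower (upper + 1) 1).foldl
        (fun acc num =>
          if left ≤ num * mul + num ∧ num * mul + num ≤ right then acc ++ [num * mul + num] else acc)
        repeats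
      repeatTwiceLoopA left right fuel (mul * 10) (PySem.Int.floordiv (mul * 10) 10) (mul * 10 - 1) repeats'
    else repeats

def repeat_twice (left : Int) (right : Int) : List Int :=
  repeatTwiceLoopA left right 64 10 1 9 []

-- ===== PORT B =====
-- inner helper f: while p <= n: p *= 10; return n * (p + 1)
def fLoopB (n : Int) : Nat → Int → Int
  | 0, p => n * (p + 1)
  | fuel+1, p => if p ≤ n then fLoopB n fuel (p * 10) else n * (p + 1)

def fB (n : Int) : Int := fLoopB n 64 10

-- while hi - lo > 1: mid = (lo+hi)//2; if f(mid) <= right: lo = mid else hi = mid; returns lo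
def bsHiB (right : Int) : Nat → Int → Int → Int
  | 0, lo, _ => lo
  | fuel+1, lo, hi =>
    if hi - lo > 1 then
      let mid := PySem.Int.floordiv (lo + hi) 2
      if fB mid ≤ right then bsHiB right fuel mid hi else bsHiB right fuel lo mid
    else lo

-- while hi - lo > 1: mid = (lo+hi)//2; if f(mid) >= left: hi = mid else lo = mid; returns hi
def bsLoB (left : Int) : Nat → Int → Int → Int
  | 0, _, hi => hi
  | fuel+1, lo, hi =>
    if hi - lo > 1 then
      let mid := PySem.Int.floordiv (lo + hi) 2
      if left ≤ fB mid then bsLoB left fuel lo mid else bsLoB left fuel mid hi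
    else hi

def repeat_twice_alt (left : Int) (right : Int) : List Int :=
  if right < 11 then []
  else
    let nHi := bsHiB right 64 1 (right + 1)
    if left ≤ fB 1 then (PySem.List.pyRange 1 (nHi + 1) 1).map fB
    else if fB nHi < left then []
    else
      let nLo := bsLoB left 64 1 nHi
      (PySem.List.pyRange nLo (nHi + 1) 1).map fB

-- ===== PRECONDITION & SPEC =====
def Spec_repeat_twice (left : Int) (right : Int) (out : List Int) : Prop := out = repeat_twice_alt left right
instance (left : Int) (right : Int) (out : List Int) : Decidable (Spec_repeat_twice left right out) := by unfold Spec_repeat_twice; infer_instance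

-- ===== CLAIM (what is proved, stated in full; the proofs are below) =====
def Claim_equal_repeat_twice : Prop := ∀ (left : Int) (right : Int), Dom_repeat_twice left right → Spec_repeat_twice left right (repeat_twice left right)

-- ===== LEMMAS AND PROOFS =====

-- f's loop: for 1 ≤ n below the fuel bound, fB n = n*(q+1) for the least power of ten q > n
lemma fLoopB_char (fuel : Nat) : ∀ (p n : Int), 1 ≤ n → (∃ j : Nat, p = 10 ^ (j + 1)) →
    p ≤ 10 * n → n < p * 10 ^ fuel →
    ∃ q : Int, fLoopB n fuel p = n * (q + 1) ∧ n < q ∧ q ≤ 10 * n ∧ ∃ j : Nat, q = 10 ^ (j + 1) := by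
  induction fuel with
  | zero =>
    intro p n hn hpow hple hlt
    simp only [pow_zero, mul_one] at hlt
    exact ⟨p, rfl, hlt, hple, hpow⟩
  | succ fuel ih =>
    intro p n hn hpow hple hlt
    simp only [fLoopB]
    by_cases h : p ≤ n
    · rw [if_pos h]
      obtain ⟨j, hj⟩ := hpow
      refine ih (p * 10) n hn ⟨j + 1, by rw [hj]; ring⟩ (by nlinarith) ?_
      calc n < p * 10 ^ (fuel + 1) := hlt
        _ = p * 10 * 10 ^ fuel := by ring
    · rw [if_neg h]
      exact ⟨p, rfl, by omega, hple, hpow⟩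

lemma fB_char (n : Int) (hn : 1 ≤ n) (hb : n ≤ 10 ^ 10) :
    ∃ q : Int, fB n = n * (q + 1) ∧ n < q ∧ q ≤ 10 * n ∧ ∃ j : Nat, q = 10 ^ (j + 1) := by
  refine fLoopB_char 64 10 n hn ⟨0, by norm_num⟩ (by omega) ?_
  have : (10 : Int) ^ 10 < 10 * 10 ^ 64 := by norm_num
  omega

-- among powers of ten: strictly smaller means at most a tenth
lemma pow_ten_le_of_lt {a b : Nat} (h : (10 : Int) ^ (a + 1) < 10 ^ (b + 1)) :
    (10 : Int) ^ (a + 1) * 10 ≤ 10 ^ (b + 1) := by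
  have hab : a < b := by
    by_contra hc
    push Not at hc
    exact absurd (pow_le_pow_right₀ (by norm_num : (1:Int) ≤ 10) (by omega : b + 1 ≤ a + 1)) (by omega)
  calc (10 : Int) ^ (a + 1) * 10 = 10 ^ (a + 2) := by ring
    _ ≤ 10 ^ (b + 1) := pow_le_pow_right₀ (by norm_num) (by omega)

-- strict monotonicity of fB on [1, 10^10]
lemma fB_strict_mono {m n : Int} (hm : 1 ≤ m) (hmn : m < n) (hb : n ≤ 10 ^ 10) :
    fB m < fB n := by
  obtain ⟨qm, hem, hmq, hqm10, jm, hjm⟩ := fB_char m hm (by omega)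
  obtain ⟨qn, hen, hnq, hqn10, jn, hjn⟩ := fB_char n (by omega) hb
  have hqmn : qm ≤ qn := by
    by_contra hc
    push Not at hc
    have h10 : qn * 10 ≤ qm := by
      have := pow_ten_le_of_lt (a := jn) (b := jm) (by rw [← hjn, ← hjm]; exact hc)
      rw [← hjn, ← hjm] at *
      linarith [this]
    -- qn*10 ≤ qm ≤ 10*m gives qn ≤ m < n < qn, contradiction
    nlinarith
  rcases eq_or_lt_of_le hqmn with heq | hlt
  · rw [hem, hen, heq]
    nlinarith
  · have h10 : qm * 10 ≤ qn := by
      have := pow_ten_le_of_lt (a := jm) (b := jn) (by rw [← hjn, ← hjm]; exact hlt)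
      rw [← hjn, ← hjm] at *
      linarith [this]
    -- fB m ≤ (qm-1)(qm+1) < qm(10 qm+1) ≤ n(qn+1) since n ≥ qn/10 ≥ qm
    have hnqm : qm ≤ n := by nlinarith
    rw [hem, hen]
    nlinarith

lemma fB_mono {m n : Int} (hm : 1 ≤ m) (hmn : m ≤ n) (hb : n ≤ 10 ^ 10) :
    fB m ≤ fB n := by
  rcases eq_or_lt_of_le hmn with rfl | h
  · exact le_refl _
  · exact le_of_lt (fB_strict_mono hm h hb)

-- lower/upper bounds on fB
lemma fB_gt_sq (n : Int) (hn : 1 ≤ n) (hb : n ≤ 10 ^ 10) : n * n < fB n := by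
  obtain ⟨q, he, h1, _, _⟩ := fB_char n hn hb
  rw [he]; nlinarith

lemma fB_ge_11 (n : Int) (hn : 1 ≤ n) (hb : n ≤ 10 ^ 10) : 11 * n ≤ fB n := by
  obtain ⟨q, he, h1, _, j, hj⟩ := fB_char n hn hb
  have : (10 : Int) ≤ q := by
    rw [hj]
    calc (10 : Int) = 10 ^ 1 := by norm_num
      _ ≤ 10 ^ (j + 1) := pow_le_pow_right₀ (by norm_num) (by omega)
  rw [he]; nlinarith

-- on an exact digit block, fB is the elementary formula A uses
lemma fB_on_block {L : Nat} (hL : 1 ≤ L) (hL6 : L ≤ 10) {n : Int}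
    (h1 : 10 ^ (L - 1) ≤ n) (h2 : n ≤ 10 ^ L - 1) : fB n = n * (10 ^ L + 1) := by
  have hp1 : (1 : Int) ≤ 10 ^ (L - 1) := one_le_pow₀ (by norm_num)
  have hLe : 10 ^ (L - 1) * 10 = (10 : Int) ^ L := by
    rw [← pow_succ]
    congr 1
    omega
  obtain ⟨q, he, hq1, hq2, j, hj⟩ := fB_char n (by omega) (by
    have : (10 : Int) ^ L ≤ 10 ^ 10 := pow_le_pow_right₀ (by norm_num) hL6
    omega)
  -- q is a power of ten with n < q ≤ 10n, and 10^(L-1) ≤ n < 10^L forces q = 10^L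
  have hqL : q = 10 ^ L := by
    have hgt : (10 : Int) ^ (L - 1) < q := by omega
    have hlt : q < 10 ^ L * 10 := by nlinarith
    rw [hj] at hgt hlt
    -- powers of ten: 10^(L-1) < 10^(j+1) < 10^(L+1) → j+1 = L
    have e1 : L - 1 < j + 1 := by
      by_contra hc
      push Not at hc
      exact absurd (pow_le_pow_right₀ (by norm_num : (1:Int) ≤ 10) hc) (by omega)
    have e2 : j + 1 < L + 1 := by
      by_contra hc
      push Not at hc
      have h3 : (10 : Int) ^ (L + 1) ≤ 10 ^ (j + 1) := pow_le_pow_right₀ (by norm_num) hc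
      have h4 : (10 : Int) ^ L * 10 = 10 ^ (L + 1) := by rw [pow_succ]
      omega
    rw [hj]
    congr 1
    omega
  rw [he, hqL]

-- filtering an integer range by an interval gives the clamped subrange
lemma filter_pyRange_interval (a b lo hi : Int) :
    (PySem.List.pyRange a b 1).filter (fun x => decide (lo ≤ x ∧ x ≤ hi))
      = PySem.List.pyRange (max a lo) (min (b - 1) hi + 1) 1 := by
  by_cases hne : max a lo ≤ min (b - 1) hi
  · have hsplit : PySem.List.pyRange a b 1
        = PySem.List.pyRange a (max a lo) 1
          ++ PySem.List.pyRange (max a lo) (min (b - 1) hi + 1) 1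
          ++ PySem.List.pyRange (min (b - 1) hi + 1) b 1 := by
      rw [PySem.List.pyRange_one_append a (min (b - 1) hi + 1) b (by omega) (by omega),
          PySem.List.pyRange_one_append a (max a lo) (min (b - 1) hi + 1) (by omega) (by omega)]
    rw [hsplit, List.filter_append, List.filter_append]
    have h1 : (PySem.List.pyRange a (max a lo) 1).filter (fun x => decide (lo ≤ x ∧ x ≤ hi)) = [] := by
      rw [List.filter_eq_nil_iff]
      intro x hx
      have := (PySem.List.mem_pyRange_one).mp hx
      simp only [decide_eq_true_eq]
      omega
    have h2 : (PySem.List.pyRange (max a lo) (min (b - 1) hi + 1) 1).filter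
        (fun x => decide (lo ≤ x ∧ x ≤ hi))
        = PySem.List.pyRange (max a lo) (min (b - 1) hi + 1) 1 := by
      rw [List.filter_eq_self]
      intro x hx
      have := (PySem.List.mem_pyRange_one).mp hx
      simp only [decide_eq_true_eq]
      omega
    have h3 : (PySem.List.pyRange (min (b - 1) hi + 1) b 1).filter
        (fun x => decide (lo ≤ x ∧ x ≤ hi)) = [] := by
      rw [List.filter_eq_nil_iff]
      intro x hx
      have := (PySem.List.mem_pyRange_one).mp hx
      simp only [decide_eq_true_eq]
      omega
    rw [h1, h2, h3]
    simp
  · have hr : PySem.List.pyRange (max a lo) (min (b - 1) hi + 1) 1 = [] :=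
      PySem.List.pyRange_one_eq_nil (by omega)
    rw [hr, List.filter_eq_nil_iff]
    intro x hx
    have := (PySem.List.mem_pyRange_one).mp hx
    simp only [decide_eq_true_eq]
    omega

lemma floordiv_mul_ten (m : Int) : PySem.Int.floordiv (m * 10) 10 = m := by
  rw [PySem.Int.floordiv_eq_iff_of_pos (by norm_num)]
  constructor <;> nlinarith

-- A's loop, started at the block of L-digit numbers, appends every qualifying
-- candidate with at least L digits (all of which lie below 10^6 on the domain)
lemma loopA_char (left right : Int) (hr : right < 10 ^ 11) :
    ∀ (fuel L : Nat) (repeats : List Int), 1 ≤ L → L ≤ 6 → 6 ≤ L + fuel →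
    repeatTwiceLoopA left right fuel (10 ^ L) (10 ^ (L - 1)) (10 ^ L - 1) repeats
      = repeats ++ ((PySem.List.pyRange (10 ^ (L - 1)) (10 ^ 6) 1).filter
          (fun n => decide (left ≤ fB n ∧ fB n ≤ right))).map fB := by
  intro fuel
  induction fuel with
  | zero =>
    intro L repeats hL1 hL6 hfuel
    have hL : L = 6 := by omega
    subst hL
    simp only [repeatTwiceLoopA]
    have hnil : (PySem.List.pyRange (10 ^ (6 - 1) : Int) (10 ^ 6) 1).filter
        (fun n => decide (left ≤ fB n ∧ fB n ≤ right)) = [] := by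
      rw [List.filter_eq_nil_iff]
      intro x hx
      have hm := (PySem.List.mem_pyRange_one).mp hx
      norm_num at hm
      have hfx : fB x = x * (10 ^ 6 + 1) := fB_on_block (L := 6) (by norm_num) (by norm_num)
        (by norm_num; omega) (by norm_num; omega)
      simp only [decide_eq_true_eq, not_and]
      intro _
      rw [hfx]
      nlinarith
    rw [hnil]
    simp
  | succ fuel ih =>
    intro L repeats hL1 hL6 hfuel
    have hL' : L - 1 + 1 = L := by omega
    have hPL : (10 : Int) ^ L = 10 ^ (L - 1) * 10 := by rw [← pow_succ, hL']
    have hP1 : (1 : Int) ≤ 10 ^ (L - 1) := one_le_pow₀ (by norm_num)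
    simp only [repeatTwiceLoopA]
    by_cases hc : 10 ^ (L - 1) * 10 ^ L + 10 ^ (L - 1) ≤ right
    · rw [if_pos hc]
      -- the while-condition forces L ≤ 5
      have hL5 : L ≤ 5 := by
        by_contra hgt
        push Not at hgt
        have h6 : (10 : Int) ^ 5 ≤ 10 ^ (L - 1) :=
          pow_le_pow_right₀ (by norm_num) (by omega)
        have h7 : (10 : Int) ^ (L - 1) * 10 ^ (L - 1) ≤ 10 ^ (L - 1) * 10 ^ L := by
          have : (10 : Int) ^ (L - 1) ≤ 10 ^ L :=
            pow_le_pow_right₀ (by norm_num) (by omega)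
          nlinarith
        nlinarith
      -- inner for-loop = append the filtered, mapped block
      rw [PySem.List.foldl_append_ite]
      have hend : (10 : Int) ^ L - 1 + 1 = 10 ^ L := by ring
      rw [hend]
      have hblock : ((PySem.List.pyRange ((10 : Int) ^ (L - 1)) (10 ^ L) 1).filter
            (fun num => decide (left ≤ num * 10 ^ L + num ∧ num * 10 ^ L + num ≤ right))).map
            (fun num => num * 10 ^ L + num)
          = ((PySem.List.pyRange ((10 : Int) ^ (L - 1)) (10 ^ L) 1).filter
            (fun n => decide (left ≤ fB n ∧ fB n ≤ right))).map fB := by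
        have hfb : ∀ x ∈ PySem.List.pyRange ((10 : Int) ^ (L - 1)) (10 ^ L) 1,
            fB x = x * 10 ^ L + x := by
          intro x hx
          have hm := (PySem.List.mem_pyRange_one).mp hx
          rw [fB_on_block (L := L) hL1 (by omega) hm.1 (by omega)]
          ring
        rw [List.filter_congr (fun x hx => by rw [← hfb x hx])]
        exact List.map_congr_left (fun x hx => (hfb x (List.mem_of_mem_filter hx)).symm)
      rw [hblock]
      -- the recursive call is the loop at level L+1
      rw [floordiv_mul_ten]
      have hnext : (10 : Int) ^ L * 10 = 10 ^ (L + 1) := (pow_succ 10 L).symm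
      have hLsub : L + 1 - 1 = L := by omega
      have hrec := ih (L + 1) (repeats ++ ((PySem.List.pyRange ((10 : Int) ^ (L - 1)) (10 ^ L) 1).filter
            (fun n => decide (left ≤ fB n ∧ fB n ≤ right))).map fB) (by omega) (by omega) (by omega)
      rw [hLsub] at hrec
      rw [hnext, hrec]
      -- stitch the two ranges back together
      have hsplit : PySem.List.pyRange ((10 : Int) ^ (L - 1)) (10 ^ 6) 1
          = PySem.List.pyRange ((10 : Int) ^ (L - 1)) (10 ^ L) 1
            ++ PySem.List.pyRange ((10 : Int) ^ L) (10 ^ 6) 1 :=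
        PySem.List.pyRange_one_append _ _ _ (by nlinarith)
          (pow_le_pow_right₀ (by norm_num) (by omega))
      rw [hsplit, List.filter_append, List.map_append, List.append_assoc]
    · rw [if_neg hc]
      -- no L-or-more-digit candidate fits below right: the remaining filter is empty
      have hnil : (PySem.List.pyRange ((10 : Int) ^ (L - 1)) (10 ^ 6) 1).filter
          (fun n => decide (left ≤ fB n ∧ fB n ≤ right)) = [] := by
        rw [List.filter_eq_nil_iff]
        intro x hx
        have hm := (PySem.List.mem_pyRange_one).mp hx
        simp only [decide_eq_true_eq, not_and]
        intro _
        by_cases hxs : x ≤ 10 ^ L - 1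
        · rw [fB_on_block (L := L) hL1 (by omega) hm.1 hxs]
          nlinarith
        · have hx10 : (10 : Int) ^ L ≤ x := by omega
          have hxb : x ≤ 10 ^ 10 := by
            have : (10 : Int) ^ 6 ≤ 10 ^ 10 := by norm_num
            omega
          have hsq := fB_gt_sq x (by omega) hxb
          nlinarith
      rw [hnil]
      simp

-- the two binary searches
lemma bsHiB_char (right : Int) : ∀ (fuel : Nat) (lo hi : Int), 1 ≤ lo → lo < hi →
    hi ≤ 10 ^ 10 → fB lo ≤ right → right < fB hi → hi - lo ≤ 2 ^ fuel →
    lo ≤ bsHiB right fuel lo hi ∧ bsHiB right fuel lo hi < hi ∧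
      fB (bsHiB right fuel lo hi) ≤ right ∧ right < fB (bsHiB right fuel lo hi + 1) := by
  intro fuel
  induction fuel with
  | zero =>
    intro lo hi h1 h2 h3 h4 h5 h6
    have he : hi = lo + 1 := by omega
    subst he
    simp only [bsHiB]
    exact ⟨le_refl _, by omega, h4, h5⟩
  | succ fuel ih =>
    intro lo hi h1 h2 h3 h4 h5 h6
    simp only [bsHiB]
    by_cases hg : hi - lo > 1
    · rw [if_pos hg]
      have hmid : PySem.Int.floordiv (lo + hi) 2 = (lo + hi) / 2 :=
        PySem.Int.floordiv_eq_ediv_of_pos (by norm_num)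
      have hg2 : (0 : Int) < 2 ^ fuel := by positivity
      have hb : lo < (lo + hi) / 2 ∧ (lo + hi) / 2 < hi ∧
          hi - (lo + hi) / 2 ≤ 2 ^ fuel ∧ (lo + hi) / 2 - lo ≤ 2 ^ fuel := by
        have h7 : hi - lo ≤ 2 ^ fuel + 2 ^ fuel := by
          have : (2 : Int) ^ (fuel + 1) = 2 ^ fuel + 2 ^ fuel := by ring
          omega
        omega
      rw [hmid]
      by_cases hf : fB ((lo + hi) / 2) ≤ right
      · rw [if_pos hf]
        have := ih ((lo + hi) / 2) hi (by omega) hb.2.1 h3 hf h5 hb.2.2.1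
        exact ⟨by omega, this.2.1, this.2.2.1, this.2.2.2⟩
      · rw [if_neg hf]
        have := ih lo ((lo + hi) / 2) h1 hb.1 (by omega) h4 (by omega) hb.2.2.2
        exact ⟨this.1, by omega, this.2.2.1, this.2.2.2⟩
    · rw [if_neg hg]
      have he : hi = lo + 1 := by omega
      subst he
      exact ⟨le_refl _, by omega, h4, h5⟩

lemma bsLoB_char (left : Int) : ∀ (fuel : Nat) (lo hi : Int), 1 ≤ lo → lo < hi →
    hi ≤ 10 ^ 10 → fB lo < left → left ≤ fB hi → hi - lo ≤ 2 ^ fuel →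
    lo < bsLoB left fuel lo hi ∧ bsLoB left fuel lo hi ≤ hi ∧
      left ≤ fB (bsLoB left fuel lo hi) ∧ fB (bsLoB left fuel lo hi - 1) < left := by
  intro fuel
  induction fuel with
  | zero =>
    intro lo hi h1 h2 h3 h4 h5 h6
    have he : hi = lo + 1 := by omega
    subst he
    simp only [bsLoB]
    exact ⟨by omega, le_refl _, h5, by simpa using h4⟩
  | succ fuel ih =>
    intro lo hi h1 h2 h3 h4 h5 h6
    simp only [bsLoB]
    by_cases hg : hi - lo > 1
    · rw [if_pos hg]
      have hmid : PySem.Int.floordiv (lo + hi) 2 = (lo + hi) / 2 :=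
        PySem.Int.floordiv_eq_ediv_of_pos (by norm_num)
      have hg2 : (0 : Int) < 2 ^ fuel := by positivity
      have hb : lo < (lo + hi) / 2 ∧ (lo + hi) / 2 < hi ∧
          hi - (lo + hi) / 2 ≤ 2 ^ fuel ∧ (lo + hi) / 2 - lo ≤ 2 ^ fuel := by
        have h7 : hi - lo ≤ 2 ^ fuel + 2 ^ fuel := by
          have : (2 : Int) ^ (fuel + 1) = 2 ^ fuel + 2 ^ fuel := by ring
          omega
        omega
      rw [hmid]
      by_cases hf : left ≤ fB ((lo + hi) / 2)
      · rw [if_pos hf]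
        have := ih lo ((lo + hi) / 2) h1 hb.1 (by omega) h4 hf hb.2.2.2
        exact ⟨this.1, by omega, this.2.2.1, this.2.2.2⟩
      · rw [if_neg hf]
        have := ih ((lo + hi) / 2) hi (by omega) hb.2.1 h3 (by omega) h5 hb.2.2.1
        exact ⟨by omega, this.2.1, this.2.2.1, this.2.2.2⟩
    · rw [if_neg hg]
      have he : hi = lo + 1 := by omega
      subst he
      exact ⟨by omega, le_refl _, h5, by simpa using h4⟩

-- A in closed characterized form, on the domain
lemma A_char (left right : Int) (hr : right ≤ 2147483648) :
    repeat_twice left right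
      = ((PySem.List.pyRange 1 ((10 : Int) ^ 6) 1).filter
          (fun n => decide (left ≤ fB n ∧ fB n ≤ right))).map fB := by
  have h := loopA_char left right (by norm_num; omega) 64 1 []
    (by norm_num) (by norm_num) (by norm_num)
  norm_num at h ⊢
  simpa [repeat_twice] using h

lemma fB_one : fB 1 = 11 := by decide

-- ===== VERDICT (by name: the statement is the Claim_ definition above) =====
theorem repeat_twice_spec : Claim_equal_repeat_twice := by
  intro left right hdom
  unfold Dom_repeat_twice pvDomInt at hdom
  simp only [Bool.and_eq_true, decide_eq_true_eq] at hdom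
  obtain ⟨⟨hl1, hl2⟩, hr1, hr2⟩ := hdom
  unfold Spec_repeat_twice
  rw [A_char left right hr2]
  unfold repeat_twice_alt
  by_cases hr11 : right < 11
  · rw [if_pos hr11]
    rw [List.filter_eq_nil_iff.mpr, List.map_nil]
    intro x hx
    have hm := (PySem.List.mem_pyRange_one).mp hx
    have h11 := fB_ge_11 x (by omega) (by norm_num at hm ⊢; omega)
    simp only [decide_eq_true_eq, not_and]
    intro _
    omega
  · rw [if_neg hr11]
    push Not at hr11
    have h2p : (2 : Int) ^ 64 = 18446744073709551616 := by norm_num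
    obtain ⟨hN1, hN2, hN3, hN4⟩ := bsHiB_char right 64 1 (right + 1)
      (by omega) (by omega) (by norm_num; omega)
      (by rw [fB_one]; omega)
      (by have := fB_ge_11 (right + 1) (by omega) (by norm_num; omega); omega)
      (by omega)
    set N := bsHiB right 64 1 (right + 1) with hNdef
    have hNb : N ≤ 10 ^ 10 := by norm_num; omega
    have hNsq := fB_gt_sq N (by omega) hNb
    have hN6 : N < 10 ^ 5 := by nlinarith
    have hRight : ∀ x : Int, 1 ≤ x → x ≤ 10 ^ 6 → (fB x ≤ right ↔ x ≤ N) := by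
      intro x hx1 hx2
      constructor
      · intro hfx
        by_contra hgt
        push Not at hgt
        have := fB_mono (m := N + 1) (n := x) (by omega) (by omega) (by norm_num; omega)
        omega
      · intro hle
        have := fB_mono (m := x) (n := N) hx1 hle hNb
        omega
    by_cases hc1 : left ≤ fB 1
    · rw [if_pos hc1]
      rw [fB_one] at hc1
      have hcong : ∀ x ∈ PySem.List.pyRange 1 ((10 : Int) ^ 6) 1,
          (decide (left ≤ fB x ∧ fB x ≤ right)) = (decide ((1 : Int) ≤ x ∧ x ≤ N)) := by
        intro x hx
        have hm := (PySem.List.mem_pyRange_one).mp hx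
        have h11 := fB_ge_11 x (by omega) (by norm_num at hm ⊢; omega)
        have hiff := hRight x (by omega) (by omega)
        simp only [decide_eq_decide]
        constructor
        · intro h; exact ⟨by omega, hiff.mp h.2⟩
        · intro h; exact ⟨by omega, hiff.mpr h.2⟩
      rw [List.filter_congr hcong, filter_pyRange_interval, max_self,
          min_eq_right (by norm_num; omega)]
    · rw [if_neg hc1]
      rw [fB_one] at hc1
      push Not at hc1
      by_cases hc2 : fB N < left
      · rw [if_pos hc2]
        rw [List.filter_eq_nil_iff.mpr, List.map_nil]
        intro x hx
        have hm := (PySem.List.mem_pyRange_one).mp hx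
        simp only [decide_eq_true_eq, not_and]
        intro hlx
        have hiff := hRight x (by omega) (by omega)
        intro hxr
        have hxN := hiff.mp hxr
        have := fB_mono (m := x) (n := N) (by omega) hxN hNb
        omega
      · rw [if_neg hc2]
        push Not at hc2
        have hN2' : 1 < N := by
          by_contra h
          push Not at h
          have : N = 1 := by omega
          rw [this, fB_one] at hc2
          omega
        obtain ⟨hM1, hM2, hM3, hM4⟩ := bsLoB_char left 64 1 N
          (by omega) hN2' hNb (by rw [fB_one]; omega) hc2 (by omega)
        set M := bsLoB left 64 1 N with hMdef
        have hcong : ∀ x ∈ PySem.List.pyRange 1 ((10 : Int) ^ 6) 1,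
            (decide (left ≤ fB x ∧ fB x ≤ right)) = (decide (M ≤ x ∧ x ≤ N)) := by
          intro x hx
          have hm := (PySem.List.mem_pyRange_one).mp hx
          have hx1 : (1 : Int) ≤ x := by norm_num at hm ⊢; omega
          have hx2 : x ≤ 10 ^ 6 := by norm_num at hm ⊢; omega
          have hiff := hRight x hx1 hx2
          have hLeft : left ≤ fB x ↔ M ≤ x := by
            constructor
            · intro hfx
              by_contra hgt
              push Not at hgt
              have := fB_mono (m := x) (n := M - 1) hx1 (by omega)
                (by norm_num; omega)
              omega
            · intro hle
              have := fB_mono (m := M) (n := x) (by omega) hle (by norm_num; omega)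
              omega
          simp only [decide_eq_decide]
          constructor
          · intro h; exact ⟨hLeft.mp h.1, hiff.mp h.2⟩
          · intro h; exact ⟨hLeft.mpr h.1, hiff.mpr h.2⟩
        rw [List.filter_congr hcong, filter_pyRange_interval,
            max_eq_right (by omega : (1 : Int) ≤ M),
            min_eq_right (by norm_num; omega)]
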